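-- pv_equiv track=rewrite | github.com/uriah-windham/100-Days-of-Code---The-Complete-Python-Pro-Bootcamp | Day 11/task/blackjack.py | did_bust
-- ===== SOURCE A (Python) =====
-- def did_bust(hand):
--     for card in range(len(hand)): #if an 'Ace' is held in hand and the players hand goes over 21, this changes the 'Aces' value from 11 to 1
--         if hand[card] == 11 and sum(hand) > 21:
--             hand[card] = 1
--
--     if sum(hand) > 21:
--         return True
--     else:
--         return False
-- ===== SOURCE B (Python) =====
-- def did_bust(hand):
--     total = sum(hand)
--     if total <= 21:
--         return False
--     aces = hand.count(11)
--     k = min(aces, (total - 21 + 9) // 10)  # aces that must drop 11 -> 1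
--     flips = k
--     for i in range(len(hand)):
--         if flips == 0:
--             break
--         if hand[i] == 11:
--             hand[i] = 1
--             flips -= 1
--     return total - 10 * k > 21
-- ===== Notes on version B (the rewrite author's own statement) =====
-- stated objective: alternative
-- what changed: Replaces A's per-index loop that re-sums the whole hand at each ace with one total, a closed-form count k = min(aces, ceil((total-21)/10)) of aces to demote, a single flip pass, and an arithmetic final test.
import Mathlib
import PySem

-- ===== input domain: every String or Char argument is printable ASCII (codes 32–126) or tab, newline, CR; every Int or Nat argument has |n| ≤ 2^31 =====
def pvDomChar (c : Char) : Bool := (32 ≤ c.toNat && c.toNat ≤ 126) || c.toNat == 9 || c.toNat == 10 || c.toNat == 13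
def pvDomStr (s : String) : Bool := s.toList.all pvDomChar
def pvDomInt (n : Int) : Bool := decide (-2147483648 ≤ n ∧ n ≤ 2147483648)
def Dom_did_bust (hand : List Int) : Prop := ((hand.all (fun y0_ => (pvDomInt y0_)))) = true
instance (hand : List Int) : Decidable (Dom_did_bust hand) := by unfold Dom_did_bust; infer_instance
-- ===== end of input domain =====

-- B replaces A's per-index loop (which re-sums the hand at each ace it inspects) by one sum, a
-- closed-form ace-demotion count and an arithmetic test; both Pythons mutate the hand the same
-- way in place, the theorems here are about the return value.

-- ===== PORT A =====
def did_bust (hand : List Int) : Bool :=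
  let h := (PySem.List.pyRange 0 hand.length 1).foldl
    (fun h card =>
      if PySem.List.pyGetD h card 0 = 11 ∧ 21 < h.sum then PySem.List.pySetD h card 1 else h)
    hand
  if 21 < h.sum then true else false

-- ===== PORT B =====
-- (Source B's flip pass only mutates the hand in place; it does not touch the returned value,
--  so the pure port carries total/aces/k and the final comparison)
def did_bust_alt (hand : List Int) : Bool :=
  let total := hand.sum
  if total ≤ 21 then false
  else
    let aces : Int := PySem.List.count hand 11
    let k := min aces (PySem.Int.floordiv (total - 21 + 9) 10)
    decide (21 < total - 10 * k)

-- ===== PRECONDITION & SPEC =====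
def Spec_did_bust (hand : List Int) (out : Bool) : Prop := out = did_bust_alt hand
instance (hand : List Int) (out : Bool) : Decidable (Spec_did_bust hand out) := by unfold Spec_did_bust; infer_instance

-- ===== CLAIM (what is proved, stated in full; the proofs are below) =====
def Claim_equal_did_bust : Prop := ∀ (hand : List Int), Dom_did_bust hand → Spec_did_bust hand (did_bust hand)

-- ===== LEMMAS AND PROOFS =====

-- structural shadow of A's loop: A's index loop only ever changes the running sum
def gflip (s : Int) : List Int → Int
  | [] => s
  | c :: cs => if c = 11 ∧ 21 < s then gflip (s - 10) cs else gflip s cs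

-- A's index-driven loop, seen through the sum of the final list, is gflip
theorem flip_loop_sum (suf pref : List Int) :
    ((List.map (fun k : Nat => (k : Int)) (List.range' pref.length suf.length)).foldl
      (fun h card =>
        if PySem.List.pyGetD h card 0 = 11 ∧ 21 < h.sum then PySem.List.pySetD h card 1 else h)
      (pref ++ suf)).sum
    = gflip ((pref ++ suf).sum) suf := by
  induction suf generalizing pref with
  | nil => simp [gflip]
  | cons c cs ih =>
    have hget : PySem.List.pyGetD (pref ++ c :: cs) (pref.length : Int) 0 = c := by
      rw [PySem.List.pyGetD_natCast]
      simp [List.getD]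
    have hset : PySem.List.pySetD (pref ++ c :: cs) (pref.length : Int) 1 = pref ++ 1 :: cs := by
      rw [PySem.List.pySetD_natCast]
      simp
    rw [show (c :: cs).length = cs.length + 1 from rfl, List.range'_succ, List.map_cons,
      List.foldl_cons, hget]
    by_cases hc : c = 11 ∧ 21 < (pref ++ c :: cs).sum
    · rw [if_pos hc, hset]
      have h1 : pref ++ 1 :: cs = (pref ++ [1]) ++ cs := by simp
      have h2 : (pref.length : Nat) + 1 = (pref ++ [1]).length := by simp
      rw [h1, h2, ih]
      have hs : ((pref ++ [1]) ++ cs).sum = (pref ++ c :: cs).sum - 10 := by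
        simp [List.sum_append, hc.1]; ring
      rw [hs, gflip, if_pos hc]
    · rw [if_neg hc]
      have h1 : pref ++ c :: cs = (pref ++ [c]) ++ cs := by simp
      have h2 : (pref.length : Nat) + 1 = (pref ++ [c]).length := by simp
      rw [h1, h2, ih, gflip, if_neg (by rw [← h1]; exact hc)]

-- closed form of the greedy flip: exactly min(aces, ceil((s-21)/10)) flips happen
theorem gflip_closed (l : List Int) (s : Int) :
    gflip s l = s - 10 * min ((List.count 11 l : Int)) (max 0 (PySem.Int.floordiv (s - 12) 10)) := by
  induction l generalizing s with
  | nil => simp [gflip]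
  | cons c cs ih =>
    by_cases hc : c = 11 ∧ 21 < s
    · rw [gflip, if_pos hc, ih]
      have hfd : PySem.Int.floordiv (s - 12) 10 = PySem.Int.floordiv (s - 10 - 12) 10 + 1 := by
        have h := (PySem.Int.floordiv_eq_iff_of_pos (a := s - 10 - 12) (b := 10)
          (q := PySem.Int.floordiv (s - 10 - 12) 10) (by omega)).mp rfl
        rw [PySem.Int.floordiv_eq_iff_of_pos (by omega)]
        constructor <;> nlinarith [h.1, h.2]
      have hnn : 0 ≤ PySem.Int.floordiv (s - 10 - 12) 10 :=
        (PySem.Int.le_floordiv_iff_mul_le (by omega)).mpr (by omega)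
      have hcount : List.count 11 (c :: cs) = List.count 11 cs + 1 := by
        simp [hc.1]
      rw [hcount, hfd]
      have hmax1 : max 0 (PySem.Int.floordiv (s - 10 - 12) 10 + 1)
          = PySem.Int.floordiv (s - 10 - 12) 10 + 1 := by omega
      have hmax2 : max 0 (PySem.Int.floordiv (s - 10 - 12) 10)
          = PySem.Int.floordiv (s - 10 - 12) 10 := by omega
      rw [hmax1, hmax2]
      push_cast
      omega
    · rw [gflip, if_neg hc, ih]
      rcases not_and_or.mp hc with h11 | hle
      · have hcount : List.count 11 (c :: cs) = List.count 11 cs := by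
          simp [List.count_cons]
          intro h; exact absurd h h11
        rw [hcount]
      · have hs : s ≤ 21 := by omega
        have hfd : PySem.Int.floordiv (s - 12) 10 < 1 := by
          rw [PySem.Int.floordiv_lt_iff_lt_mul (by omega)]; omega
        have hm : max 0 (PySem.Int.floordiv (s - 12) 10) = 0 := by omega
        rw [hm]
        omega

-- ===== VERDICT (by name: the statement is the Claim_ definition above) =====
theorem did_bust_spec : Claim_equal_did_bust := by
  intro hand _
  unfold Spec_did_bust did_bust did_bust_alt
  dsimp only
  rw [PySem.List.pyRange_zero_natCast, List.range_eq_range']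
  have hmain := flip_loop_sum hand []
  simp only [List.length_nil, List.nil_append] at hmain
  rw [hmain, gflip_closed, PySem.List.count_eq]
  have harg : hand.sum - 21 + 9 = hand.sum - 12 := by ring
  rw [harg]
  by_cases hle : hand.sum ≤ 21
  · rw [if_pos hle]
    have hfd : PySem.Int.floordiv (hand.sum - 12) 10 < 1 := by
      rw [PySem.Int.floordiv_lt_iff_lt_mul (by omega)]; omega
    have hm : max 0 (PySem.Int.floordiv (hand.sum - 12) 10) = 0 := by omega
    rw [hm]
    have h1 : min ((List.count 11 hand : Int)) 0 = 0 := by omega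
    rw [h1]
    simp; omega
  · rw [if_neg hle]
    have hfd : 1 ≤ PySem.Int.floordiv (hand.sum - 12) 10 := by
      rw [PySem.Int.le_floordiv_iff_mul_le (by omega)]; omega
    have hm : max 0 (PySem.Int.floordiv (hand.sum - 12) 10)
        = PySem.Int.floordiv (hand.sum - 12) 10 := by omega
    rw [hm]
    by_cases hb : 21 < hand.sum - 10 * min ((List.count 11 hand : Int)) (PySem.Int.floordiv (hand.sum - 12) 10)
    · simp
    · simp
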